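-- pv_equiv track=rewrite | github.com/brownjm/praisetex | parser.py | parse_structure
-- ===== SOURCE A (Python) =====
-- def parse_structure(lines):
--     """Break up song text into list of lists"""
--     lines.reverse() # easier to group stanzas in reverse
--     stack = []
--     songlist = []
--     for item in lines:
--         if ':' in item:
--             stack.append(item)
--             stack.reverse()
--             songlist.append(stack)
--             stack = []
--         else:
--             stack.append(item)
--     songlist.reverse()
--     lines.reverse()
--     return songlist
-- ===== SOURCE B (Python) =====
-- def parse_structure(lines):
--     """Break up song text into list of lists"""
--     songlist = []
--     n = len(lines)
--     i = 0
--     while i < n: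
--         if ':' in lines[i]:
--             j = i + 1
--             while j < n and ':' not in lines[j]:
--                 j += 1
--             songlist.append(lines[i:j])
--             i = j
--         else:
--             i += 1
--     return songlist
-- ===== Notes on version B (the rewrite author's own statement) =====
-- stated objective: simpler
-- what changed: Single forward scan that takes each ':' line together with the run of following non-':' lines as one stanza, instead of A's reverse-the-list, stack-accumulate-flush-and-reverse-everything approach (and B never mutates lines).
import Mathlib
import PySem

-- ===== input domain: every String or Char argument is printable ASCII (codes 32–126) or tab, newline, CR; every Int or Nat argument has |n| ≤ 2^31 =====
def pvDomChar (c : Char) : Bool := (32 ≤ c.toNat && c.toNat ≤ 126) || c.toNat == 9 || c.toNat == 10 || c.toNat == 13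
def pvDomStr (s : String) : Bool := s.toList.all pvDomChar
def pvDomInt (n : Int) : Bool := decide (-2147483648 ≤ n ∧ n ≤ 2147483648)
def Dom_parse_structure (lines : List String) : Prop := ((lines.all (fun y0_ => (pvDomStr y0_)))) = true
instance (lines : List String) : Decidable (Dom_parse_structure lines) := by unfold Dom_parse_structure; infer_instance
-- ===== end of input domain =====

-- B replaces A's reverse/stack/flush/re-reverse grouping by a single forward scan taking each ':' line
-- with its following run of non-':' lines (simpler; return value only — A also reverses `lines` twice in
-- place, a net no-op the caller cannot observe, B does not touch `lines`).

-- ===== PORT A =====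
-- one loop iteration of A: state = (stack, songlist)
def pvStepA (st : List String × List (List String)) (item : String) :
    List String × List (List String) :=
  if PySem.Str.isIn ":" item then
    ([], st.2 ++ [(st.1 ++ [item]).reverse])
  else
    (st.1 ++ [item], st.2)

def parse_structure (lines : List String) : List (List String) :=
  ((lines.reverse).foldl pvStepA ([], [])).2.reverse

-- ===== PORT B =====
def pvNoColon (y : String) : Bool := !PySem.Str.isIn ":" y

def parse_structure_alt (lines : List String) : List (List String) :=
  match lines with
  | [] => []
  | x :: xs =>
    if PySem.Str.isIn ":" x then
      (x :: xs.takeWhile pvNoColon) :: parse_structure_alt (xs.dropWhile pvNoColon)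
    else
      parse_structure_alt xs
termination_by lines.length
decreasing_by
  · have h := List.length_dropWhile_le pvNoColon xs
    simp; omega
  · simp

-- ===== PRECONDITION & SPEC =====
def Spec_parse_structure (lines : List String) (out : List (List String)) : Prop := out = parse_structure_alt lines
instance (lines : List String) (out : List (List String)) : Decidable (Spec_parse_structure lines out) := by unfold Spec_parse_structure; infer_instance

-- ===== CLAIM (what is proved, stated in full; the proofs are below) =====
def Claim_equal_parse_structure : Prop := ∀ (lines : List String), Dom_parse_structure lines → Spec_parse_structure lines (parse_structure lines)

-- ===== LEMMAS AND PROOFS =====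

theorem alt_dropWhile (xs : List String) :
    parse_structure_alt (xs.dropWhile pvNoColon) = parse_structure_alt xs := by
  induction xs with
  | nil => rfl
  | cons x xs ih =>
    by_cases h : PySem.Chars.isIn [':'] x.toList = true
    · simp [pvNoColon, PySem.Str.isIn, h]
    · simp only [Bool.not_eq_true] at h
      simp [pvNoColon, PySem.Str.isIn, h, parse_structure_alt, ih]

theorem foldr_key (l : List String) :
    l.foldr (fun x s => pvStepA s x) ([], []) =
      ((l.takeWhile pvNoColon).reverse, (parse_structure_alt l).reverse) := by
  induction l with
  | nil => simp [pvStepA, parse_structure_alt]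
  | cons x xs ih =>
    simp only [List.foldr_cons, ih]
    by_cases h : PySem.Chars.isIn [':'] x.toList = true
    · simp [pvStepA, PySem.Str.isIn, h, pvNoColon, parse_structure_alt,
        alt_dropWhile]
    · simp only [Bool.not_eq_true] at h
      simp [pvStepA, PySem.Str.isIn, h, pvNoColon, parse_structure_alt]

-- ===== VERDICT (by name: the statement is the Claim_ definition above) =====
theorem parse_structure_spec : Claim_equal_parse_structure := by
  intro lines _
  unfold Spec_parse_structure parse_structure
  rw [List.foldl_reverse, foldr_key]
  simp
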